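/- GENERATED by c/gen_decode.py: decode facts of the image, one per distinct instruction byte string. -/
import UserX.DecodeImage

#decode_all Toy.Dec
  "480fafe8"  -- imul rbp,rax
  "4883ff40"  -- cmp rdi,0x40
  "48c744241000501000"  -- mov QWORD PTR [rsp+0x10],0x105000
  "4d89ec"  -- mov r12,r13
  "8d0cdd00000000"  -- lea ecx,[rbx*8+0x0]
  "c7830c00c00000000000"  -- mov DWORD PTR [rbx+0xc0000c],0x0
  "e8a4b0ffff"  -- call 100300
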